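-- pv_equiv track=rewrite | github.com/bensouiciakram/AutoScout24-Car-Listings-Scraper | scraper.py | clean_model
-- ===== SOURCE A (Python) =====
-- def clean_model(model):
--     clean_list = {
--         ' ': '-',
--         '/':'%2F',
--     }
--     model = model.lower()
--     for key,value in clean_list.items() :
--         model = model.replace(key,value)
--     return model
-- ===== SOURCE B (Python) =====
-- def clean_model(model):
--     mapping = {' ': '-', '/': '%2F'}
--     return ''.join(mapping.get(c, c) for c in model.lower())
-- ===== Notes on version B (the rewrite author's own statement) =====
-- stated objective: idiomatic
-- what changed: Replaces A's two sequential whole-string replace passes (a loop over a mapping dict) with a single pass over the lowercased string that maps each character through the dict via mapping.get(c, c) and joins the results.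
import Mathlib
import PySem

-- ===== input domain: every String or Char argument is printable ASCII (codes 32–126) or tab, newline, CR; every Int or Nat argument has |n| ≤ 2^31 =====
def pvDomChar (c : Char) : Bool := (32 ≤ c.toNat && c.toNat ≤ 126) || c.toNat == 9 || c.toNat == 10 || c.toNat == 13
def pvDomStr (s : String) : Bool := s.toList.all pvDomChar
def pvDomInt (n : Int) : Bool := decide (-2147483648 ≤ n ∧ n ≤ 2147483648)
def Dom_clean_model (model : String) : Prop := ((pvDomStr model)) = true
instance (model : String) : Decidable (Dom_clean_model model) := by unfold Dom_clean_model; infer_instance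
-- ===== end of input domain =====

-- B replaces A's two sequential whole-string replace passes with one single pass
-- mapping each character of the lowercased string through the dict (idiomatic join/get).


-- ===== PORT A =====
-- A: lowercase, then loop over the mapping's items replacing each key by its value
-- (dict iteration order is insertion order: ' ' first, then '/').
def clean_model (model : String) : String :=
  let clean_list : PySem.Dict String String :=
    ((PySem.Dict.empty.insert " " "-").insert "/" "%2F")
  let model := PySem.Str.lower model
  let model := clean_list.items.foldl (fun m kv => PySem.Str.replace m kv.1 kv.2) model
  model

-- ===== PORT B =====
-- B: single pass over the lowercased characters, mapping each through the dict with default c.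
def clean_model_alt (model : String) : String :=
  let mapping : PySem.Dict Char String := ((PySem.Dict.empty.insert ' ' "-").insert '/' "%2F")
  PySem.Str.join "" ((PySem.Str.lower model).toList.map (fun c => mapping.getD c (String.ofList [c])))

-- ===== PRECONDITION & SPEC =====
def Spec_clean_model (model : String) (out : String) : Prop := out = clean_model_alt model
instance (model : String) (out : String) : Decidable (Spec_clean_model model out) := by unfold Spec_clean_model; infer_instance

-- ===== CLAIM (what is proved, stated in full; the proofs are below) =====
def Claim_equal_clean_model : Prop := ∀ (model : String), Dom_clean_model model → Spec_clean_model model (clean_model model)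

-- ===== LEMMAS AND PROOFS =====

-- str.replace by a single-character pattern is a per-character flatMap
theorem replace_go_single (a : Char) (new : List Char) :
    ∀ (fuel : Nat) (l acc : List Char), l.length ≤ fuel →
      PySem.Chars.replace.go [a] new fuel l acc
        = acc.reverse ++ l.flatMap (fun c => if c = a then new else [c]) := by
  intro fuel
  induction fuel with
  | zero =>
    intro l acc h
    have : l = [] := List.length_eq_zero_iff.mp (Nat.le_zero.mp h)
    subst this; simp [PySem.Chars.replace.go]
  | succ n ih =>
    intro l acc h
    cases l with
    | nil => simp [PySem.Chars.replace.go]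
    | cons c t =>
      simp only [PySem.Chars.replace.go]
      by_cases hc : c = a
      · subst hc
        have hp : [c].isPrefixOf (c :: t) = true := by simp [List.isPrefixOf]
        rw [if_pos hp]
        simp only [List.length_cons, List.length_nil, List.drop_succ_cons, List.drop_zero]
        rw [ih t (new.reverse ++ acc) (Nat.le_of_succ_le_succ (by simpa using h))]
        simp
      · have hp : [a].isPrefixOf (c :: t) = false := by
          simp [List.isPrefixOf, Ne.symm hc]
        rw [if_neg (by simp [hp])]
        rw [ih t (c :: acc) (Nat.le_of_succ_le_succ (by simpa using h))]
        simp [hc]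

theorem replace_single (a : Char) (new s : List Char) :
    PySem.Chars.replace s [a] new = s.flatMap (fun c => if c = a then new else [c]) := by
  rw [PySem.Chars.replace]
  simp only [List.isEmpty_cons, Bool.false_eq_true, if_false]
  simpa using replace_go_single a new s.length s [] (le_refl _)

theorem A_eq (model : String) :
    clean_model model
      = String.ofList (PySem.Chars.replace (PySem.Chars.replace
          (PySem.Chars.lower model.toList) [' '] ['-']) ['/'] ['%','2','F']) := by
  simp [clean_model, PySem.Dict.insert, PySem.Dict.empty, PySem.Dict.contains,
    PySem.Str.replace, PySem.Str.lower]

theorem flatten_intersperse_nil (l : List (List Char)) :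
    (List.intersperse ([] : List Char) l).flatten = l.flatten := by
  induction l with
  | nil => rfl
  | cons x xs ih => cases xs <;> simp_all [List.intersperse]

theorem join_map (f : Char → List Char) (l : List Char) :
    PySem.Chars.join [] (List.map f l) = l.flatMap f := by
  simp [PySem.Chars.join, List.intercalate, flatten_intersperse_nil, List.flatMap_def]

theorem B_eq (model : String) :
    clean_model_alt model
      = String.ofList ((PySem.Chars.lower model.toList).flatMap
          (fun c => if c = ' ' then ['-'] else if c = '/' then ['%','2','F'] else [c])) := by
  simp only [clean_model_alt, PySem.Str.join, PySem.Str.lower, String.toList_ofList]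
  congr 1
  rw [List.map_map]
  rw [show (String.toList ∘ fun c => (((PySem.Dict.empty.insert ' ' "-").insert '/' "%2F") : PySem.Dict Char String).getD c (String.ofList [c])) = fun c => if c = ' ' then ['-'] else if c = '/' then ['%','2','F'] else [c] from ?_]
  · exact join_map _ _
  · funext c
    by_cases h1 : c = ' '
    · simp [h1, PySem.Dict.getD, PySem.Dict.get?, PySem.Dict.insert, PySem.Dict.empty, PySem.Dict.contains]
    · by_cases h2 : c = '/'
      · simp [h2, PySem.Dict.getD, PySem.Dict.get?, PySem.Dict.insert, PySem.Dict.empty, PySem.Dict.contains]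
      · simp [h1, h2, PySem.Dict.getD, PySem.Dict.get?, PySem.Dict.insert, PySem.Dict.empty,
          PySem.Dict.contains, List.find?,
          show ((' ':Char) == c) = false by simp [Ne.symm h1],
          show (('/':Char) == c) = false by simp [Ne.symm h2]]

-- ===== VERDICT (by name: the statement is the Claim_ definition above) =====
theorem clean_model_spec : Claim_equal_clean_model := by
  intro model _
  unfold Spec_clean_model
  rw [A_eq, B_eq, replace_single, replace_single, List.flatMap_assoc]
  congr 1
  apply List.flatMap_congr
  intro c _
  by_cases h1 : c = ' '
  · simp [h1]
  · by_cases h2 : c = '/' <;> simp [h1, h2]
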